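-- pv_equiv track=rewrite | github.com/isVoid/advant_of_code_2022 | day14/day14.py | find
-- ===== SOURCE A (Python) =====
-- def find(loc, occupied, floor_y):
--     # log(loc, occupied)
--     x, y = loc
--     if y == floor_y:
--         return (x, y-1)
--     if (x, y+1) not in occupied:
--         return find((x, y+1), occupied, floor_y)
--     elif (x-1, y+1) not in occupied:
--         return find((x-1, y+1), occupied, floor_y)
--     elif (x+1, y+1) not in occupied:
--         return find((x+1, y+1), occupied, floor_y)
--     else:
--         return (x, y)
-- ===== SOURCE B (Python) =====
-- def find(loc, occupied, floor_y):
--     x, y = loc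
--     while True:
--         if y == floor_y:
--             return (x, y - 1)
--         blockers = [oy for (ox, oy) in occupied if ox == x and y < oy <= floor_y]
--         if not blockers:
--             return (x, floor_y - 1)
--         y = min(blockers) - 1
--         if (x - 1, y + 1) not in occupied:
--             x, y = x - 1, y + 1
--         elif (x + 1, y + 1) not in occupied:
--             x, y = x + 1, y + 1
--         else:
--             return (x, y)
-- ===== Notes on version B (the rewrite author's own statement) =====
-- stated objective: alternative
-- what changed: Replaces the cell-by-cell tail recursion with an iterative loop that computes each straight-down fall in one pass (min of the blocking rocks in the current column) and then takes a single diagonal step, instead of descending one cell per call.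
-- outside the precondition, e.g. on find((0, 1), {(1, 2), (0, 2), (-1, 2)}, 0): A returns (0, 1), B returns (0, -1)
import Mathlib
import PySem

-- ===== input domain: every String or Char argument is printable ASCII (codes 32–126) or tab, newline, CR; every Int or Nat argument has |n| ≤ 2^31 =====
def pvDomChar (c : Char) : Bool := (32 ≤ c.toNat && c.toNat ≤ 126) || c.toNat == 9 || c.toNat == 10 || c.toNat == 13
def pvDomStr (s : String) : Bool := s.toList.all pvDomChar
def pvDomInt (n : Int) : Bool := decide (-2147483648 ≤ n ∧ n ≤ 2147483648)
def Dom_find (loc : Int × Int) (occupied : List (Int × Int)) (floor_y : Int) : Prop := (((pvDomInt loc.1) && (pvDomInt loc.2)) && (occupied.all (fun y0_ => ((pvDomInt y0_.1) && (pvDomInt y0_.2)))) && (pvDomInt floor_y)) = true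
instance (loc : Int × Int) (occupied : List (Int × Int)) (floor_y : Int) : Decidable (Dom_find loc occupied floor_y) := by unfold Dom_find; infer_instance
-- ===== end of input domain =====

-- B replaces A's cell-by-cell tail recursion by an iterative loop that does each straight-down
-- fall in one pass (min of the blocking rocks in the current column) then one diagonal step.


-- ===== PORT A =====
-- A's recursion descends one cell per call; fuel (floor_y - y).toNat + 1 is enough on Pre_
-- (y increases by exactly 1 on every recursive call and the recursion stops at y = floor_y).
def findA (x y : Int) (occupied : List (Int × Int)) (floor_y : Int) : Nat → Int × Int
  | 0 => (x, y)
  | fuel + 1 =>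
    if y = floor_y then (x, y - 1)
    else if (x, y + 1) ∉ occupied then findA x (y + 1) occupied floor_y fuel
    else if (x - 1, y + 1) ∉ occupied then findA (x - 1) (y + 1) occupied floor_y fuel
    else if (x + 1, y + 1) ∉ occupied then findA (x + 1) (y + 1) occupied floor_y fuel
    else (x, y)

def find (loc : Int × Int) (occupied : List (Int × Int)) (floor_y : Int) : Int × Int :=
  findA loc.1 loc.2 occupied floor_y ((floor_y - loc.2).toNat + 1)

-- ===== PORT B =====
-- the list comprehension [oy for (ox, oy) in occupied if ox == x and y < oy <= floor_y]
def blockers (x y floor_y : Int) (occupied : List (Int × Int)) : List Int :=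
  occupied.filterMap (fun p => if p.1 = x ∧ y < p.2 ∧ p.2 ≤ floor_y then some p.2 else none)

-- B's while-loop; each iteration strictly increases y (on Pre_), so the same fuel bound works.
def findB (x y : Int) (occupied : List (Int × Int)) (floor_y : Int) : Nat → Int × Int
  | 0 => (x, y)
  | fuel + 1 =>
    if y = floor_y then (x, y - 1)
    else
      match PySem.List.min? (blockers x y floor_y occupied) (fun v => v) with
      | none => (x, floor_y - 1)
      | some b =>
        let y' := b - 1
        if (x - 1, y' + 1) ∉ occupied then findB (x - 1) (y' + 1) occupied floor_y fuel
        else if (x + 1, y' + 1) ∉ occupied then findB (x + 1) (y' + 1) occupied floor_y fuel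
        else (x, y')

def find_alt (loc : Int × Int) (occupied : List (Int × Int)) (floor_y : Int) : Int × Int :=
  findB loc.1 loc.2 occupied floor_y ((floor_y - loc.2).toNat + 1)

-- ===== PRECONDITION & SPEC =====
-- Pre_ excludes starts strictly below the floor (loc.2 > floor_y): there A either recurses
-- forever (RecursionError) or, when all three cells below are occupied, returns the start cell
-- of this unreachable region — a corner no caller of the puzzle exercises; B returns
-- (x, floor_y - 1) there.
def Pre_find (loc : Int × Int) (occupied : List (Int × Int)) (floor_y : Int) : Prop :=
  loc.2 ≤ floor_y
instance (loc : Int × Int) (occupied : List (Int × Int)) (floor_y : Int) : Decidable (Pre_find loc occupied floor_y) := by unfold Pre_find; infer_instance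

def pvWitness_find : (Int × Int) × (List (Int × Int)) × Int := ((500, 0), [(500, 3), (499, 3), (501, 3)], 5)

def Spec_find (loc : Int × Int) (occupied : List (Int × Int)) (floor_y : Int) (out : Int × Int) : Prop := out = find_alt loc occupied floor_y
instance (loc : Int × Int) (occupied : List (Int × Int)) (floor_y : Int) (out : Int × Int) : Decidable (Spec_find loc occupied floor_y out) := by unfold Spec_find; infer_instance

-- ===== CLAIM (what is proved, stated in full; the proofs are below) =====
def Claim_equal_find : Prop := ∀ (loc : Int × Int) (occupied : List (Int × Int)) (floor_y : Int), Dom_find loc occupied floor_y → Pre_find loc occupied floor_y → Spec_find loc occupied floor_y (find loc occupied floor_y)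

-- ===== LEMMAS AND PROOFS =====

theorem mem_blockers {x y floor_y : Int} {occupied : List (Int × Int)} {b : Int} :
    b ∈ blockers x y floor_y occupied ↔ ((x, b) ∈ occupied ∧ y < b ∧ b ≤ floor_y) := by
  unfold blockers
  simp only [List.mem_filterMap]
  constructor
  · rintro ⟨⟨px, py⟩, hp, hf⟩
    by_cases h : px = x ∧ y < py ∧ py ≤ floor_y
    · simp only [if_pos h] at hf
      obtain ⟨h1, h2, h3⟩ := h
      cases hf
      exact ⟨h1 ▸ hp, h2, h3⟩
    · simp [if_neg h] at hf
  · rintro ⟨hmem, h2, h3⟩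
    exact ⟨(x, b), hmem, by simp [h2, h3]⟩

-- fuel irrelevance for findA once fuel exceeds (floor_y - y).toNat, on y ≤ floor_y
theorem findA_fuel {f1 : Nat} : ∀ {f2 : Nat} {x y floor_y : Int} {occupied : List (Int × Int)},
    y ≤ floor_y → (floor_y - y).toNat < f1 → (floor_y - y).toNat < f2 →
    findA x y occupied floor_y f1 = findA x y occupied floor_y f2 := by
  induction f1 with
  | zero => intro f2 x y fy occ _ h1 _; omega
  | succ g ih =>
    intro f2 x y fy occ hy h1 h2
    match f2, h2 with
    | h + 1, _ =>
      show findA x y occ fy (g + 1) = findA x y occ fy (h + 1)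
      unfold findA
      by_cases heq : y = fy
      · simp [heq]
      · have hlt : y < fy := lt_of_le_of_ne hy heq
        have hy' : y + 1 ≤ fy := by omega
        have hb : (fy - (y + 1)).toNat < g ∧ (fy - (y + 1)).toNat < h := by omega
        simp only [if_neg heq]
        split_ifs <;> first
          | exact ih hy' hb.1 hb.2
          | rfl

theorem findB_fuel {f1 : Nat} : ∀ {f2 : Nat} {x y floor_y : Int} {occupied : List (Int × Int)},
    y ≤ floor_y → (floor_y - y).toNat < f1 → (floor_y - y).toNat < f2 →
    findB x y occupied floor_y f1 = findB x y occupied floor_y f2 := by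
  induction f1 with
  | zero => intro f2 x y fy occ _ h1 _; omega
  | succ g ih =>
    intro f2 x y fy occ hy h1 h2
    match f2, h2 with
    | h + 1, _ =>
      show findB x y occ fy (g + 1) = findB x y occ fy (h + 1)
      unfold findB
      by_cases heq : y = fy
      · simp [heq]
      · simp only [if_neg heq]
        rcases hm : PySem.List.min? (blockers x y fy occ) (fun v => v) with _ | b
        · rfl
        · have hbmem := mem_blockers.mp (PySem.List.min?_mem hm)
          have hyb : y < b := hbmem.2.1
          have hbfy : b ≤ fy := hbmem.2.2
          have hy' : (b - 1) + 1 ≤ fy := by omega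
          have hb : (fy - ((b - 1) + 1)).toNat < g ∧ (fy - ((b - 1) + 1)).toNat < h := by omega
          simp only []
          split_ifs <;> first
            | exact ih hy' hb.1 hb.2
            | rfl

-- straight fall with no blocker in the column: A reaches the floor
theorem findA_noblock : ∀ (k : Nat) {x y floor_y : Int} {occupied : List (Int × Int)},
    (floor_y - y).toNat = k → y ≤ floor_y →
    blockers x y floor_y occupied = [] →
    findA x y occupied floor_y (k + 1) = (x, floor_y - 1) := by
  intro k
  induction k with
  | zero =>
    intro x y fy occ hk hy _
    have : y = fy := by omega
    unfold findA
    simp [this]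
  | succ m ih =>
    intro x y fy occ hk hy hnb
    have hne : y ≠ fy := by omega
    have hfree : (x, y + 1) ∉ occ := by
      intro hmem
      have : (y + 1) ∈ blockers x y fy occ := mem_blockers.mpr ⟨hmem, by omega, by omega⟩
      simp [hnb] at this
    have hnb' : blockers x (y + 1) fy occ = [] := by
      rcases h : blockers x (y + 1) fy occ with _ | ⟨c, t⟩
      · rfl
      · exfalso
        have hc : c ∈ blockers x (y + 1) fy occ := by simp [h]
        have := mem_blockers.mp hc
        have : c ∈ blockers x y fy occ := mem_blockers.mpr ⟨this.1, by omega, this.2.2⟩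
        simp [hnb] at this
    unfold findA
    simp only [if_neg hne, if_pos hfree]
    exact ih (by omega) (by omega) hnb'

-- straight fall down to just above the least blocker b
theorem findA_drop : ∀ (d : Nat) {x y b floor_y : Int} {occupied : List (Int × Int)},
    (b - 1 - y).toNat = d → y ≤ floor_y →
    PySem.List.min? (blockers x y floor_y occupied) (fun v => v) = some b →
    findA x y occupied floor_y ((floor_y - y).toNat + 1)
      = findA x (b - 1) occupied floor_y ((floor_y - (b - 1)).toNat + 1) := by
  intro d
  induction d with
  | zero =>
    intro x y b fy occ hd hy hm
    have hbm := mem_blockers.mp (PySem.List.min?_mem hm)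
    have : b - 1 = y := by omega
    rw [this]
  | succ m ih =>
    intro x y b fy occ hd hy hm
    have hbm := mem_blockers.mp (PySem.List.min?_mem hm)
    have hbfy : b ≤ fy := hbm.2.2
    have hylt : y < b - 1 := by omega
    have hne : y ≠ fy := by omega
    have hfree : (x, y + 1) ∉ occ := by
      intro hmem
      have hin : (y + 1) ∈ blockers x y fy occ := mem_blockers.mpr ⟨hmem, by omega, by omega⟩
      have := PySem.List.min?_isMin hm (y + 1) hin
      simp at this
      omega
    have hm' : PySem.List.min? (blockers x (y + 1) fy occ) (fun v => v) = some b := by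
      have hbin : b ∈ blockers x (y + 1) fy occ := mem_blockers.mpr ⟨hbm.1, by omega, hbfy⟩
      rcases h2 : PySem.List.min? (blockers x (y + 1) fy occ) (fun v => v) with _ | c
      · rw [PySem.List.min?_eq_none_iff] at h2
        simp [h2] at hbin
      · have hcm := mem_blockers.mp (PySem.List.min?_mem h2)
        have hcin : c ∈ blockers x y fy occ := mem_blockers.mpr ⟨hcm.1, by omega, hcm.2.2⟩
        have h3 := PySem.List.min?_isMin hm c hcin
        have h4 := PySem.List.min?_isMin h2 b hbin
        simp at h3 h4
        have : b = c := le_antisymm h3 h4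
        rw [this]
    have hstep : findA x y occ fy ((fy - y).toNat + 1)
        = findA x (y + 1) occ fy ((fy - (y + 1)).toNat + 1) := by
      conv_lhs => unfold findA
      simp only [if_neg hne, if_pos hfree]
      exact findA_fuel (by omega) (by omega) (by omega)
    rw [hstep]
    exact ih (by omega) (by omega) hm'

-- the main equivalence, strong induction on the distance to the floor
theorem main_eq : ∀ (k : Nat), ∀ {x y floor_y : Int} {occupied : List (Int × Int)},
    y ≤ floor_y → (floor_y - y).toNat = k →
    findA x y occupied floor_y (k + 1) = findB x y occupied floor_y (k + 1) := by
  intro k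
  induction k using Nat.strong_induction_on with
  | _ k ih =>
    intro x y fy occ hy hk
    by_cases heq : y = fy
    · unfold findA findB
      simp [heq]
    · have hlt : y < fy := lt_of_le_of_ne hy heq
      obtain ⟨m, rfl⟩ : ∃ m, k = m + 1 := ⟨k - 1, by omega⟩
      conv_rhs => rw [findB]
      simp only [if_neg heq]
      rcases hm : PySem.List.min? (blockers x y fy occ) (fun v => v) with _ | b
      · rw [PySem.List.min?_eq_none_iff] at hm
        exact findA_noblock (m + 1) hk hy hm
      · have hbm := mem_blockers.mp (PySem.List.min?_mem hm)
        have hyb : y < b := hbm.2.1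
        have hbfy : b ≤ fy := hbm.2.2
        have hdrop := findA_drop (b - 1 - y).toNat rfl hy hm
        rw [hk] at hdrop
        rw [hdrop]
        have hne2 : b - 1 ≠ fy := by omega
        have hocc : ¬ ((x, (b - 1) + 1) ∉ occ) := by
          have hb1 : b - 1 + 1 = b := by omega
          rw [hb1]
          simp [hbm.1]
        have hfuelA : (fy - (b - 1)).toNat + 1 = ((fy - b).toNat + 1) + 1 := by omega
        conv_lhs => rw [hfuelA]; rw [findA]
        simp only [if_neg hne2, if_neg hocc]
        have hk2 : (fy - ((b - 1) + 1)).toNat = (fy - b).toNat := by omega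
        have hy2 : (b - 1) + 1 ≤ fy := by omega
        have hsm : (fy - b).toNat < m + 1 := by omega
        have hrec : ∀ x' : Int, findA x' ((b - 1) + 1) occ fy ((fy - b).toNat + 1)
            = findB x' ((b - 1) + 1) occ fy (m + 1) := by
          intro x'
          rw [ih _ hsm hy2 hk2]
          exact findB_fuel hy2 (by omega) (by omega)
        split_ifs <;> first
          | exact hrec _
          | rfl

-- ===== VERDICT (by name: the statement is the Claim_ definition above) =====
theorem find_spec : Claim_equal_find := by
  intro loc occ fy _ hpre
  unfold Spec_find find find_alt
  have hk : (fy - loc.2).toNat = (fy - loc.2).toNat := rfl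
  exact main_eq _ hpre rfl
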